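-- pv_equiv track=rewrite | github.com/ctaoaa/G2SF | G2SF_GITHUB/Dataset/mvtec3d.py | exclude_images
-- ===== SOURCE A (Python) =====
-- def exclude_images(images, pcds, labels, masks, types, target_excluded_images):
--     retain_images, retain_pcds = [], []
--     retain_labels, retain_masks, retain_types = [], [], []
--     for idx, image in enumerate(images):
--         if image in target_excluded_images:
--             continue
--         retain_images.append(image)
--         retain_pcds.append(pcds[idx])
--         retain_labels.append(labels[idx])
--         retain_masks.append(masks[idx])
--         retain_types.append(types[idx])
--     return retain_images, retain_pcds, retain_labels, retain_masks, retain_types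
-- ===== SOURCE B (Python) =====
-- def exclude_images(images, pcds, labels, masks, types, target_excluded_images):
--     excluded = set(target_excluded_images)
--     keep = [i for i, image in enumerate(images) if image not in excluded]
--     retain_images = [images[i] for i in keep]
--     retain_pcds = [pcds[i] for i in keep]
--     retain_labels = [labels[i] for i in keep]
--     retain_masks = [masks[i] for i in keep]
--     retain_types = [types[i] for i in keep]
--     return retain_images, retain_pcds, retain_labels, retain_masks, retain_types
-- ===== Notes on version B (the rewrite author's own statement) =====
-- stated objective: alternative
-- what changed: Instead of one interleaved loop appending to five lists, B first builds an excluded set and an index table of retained positions, then constructs each of the five result lists independently by indexing through that table.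
import Mathlib
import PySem

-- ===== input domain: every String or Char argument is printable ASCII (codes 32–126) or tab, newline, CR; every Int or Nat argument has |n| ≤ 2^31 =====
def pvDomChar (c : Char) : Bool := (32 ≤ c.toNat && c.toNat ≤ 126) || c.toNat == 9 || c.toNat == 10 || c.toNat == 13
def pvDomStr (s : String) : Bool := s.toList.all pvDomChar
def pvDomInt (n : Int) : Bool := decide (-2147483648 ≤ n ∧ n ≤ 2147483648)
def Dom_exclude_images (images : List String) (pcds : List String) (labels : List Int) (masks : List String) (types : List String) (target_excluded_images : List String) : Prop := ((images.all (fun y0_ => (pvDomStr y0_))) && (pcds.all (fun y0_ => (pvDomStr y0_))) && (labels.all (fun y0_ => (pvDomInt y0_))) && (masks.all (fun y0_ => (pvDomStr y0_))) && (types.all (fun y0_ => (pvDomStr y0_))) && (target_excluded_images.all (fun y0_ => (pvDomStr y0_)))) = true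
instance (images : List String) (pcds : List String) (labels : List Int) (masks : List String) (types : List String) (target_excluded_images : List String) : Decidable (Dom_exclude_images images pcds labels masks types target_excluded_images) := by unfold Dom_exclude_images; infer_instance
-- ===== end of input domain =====

-- B replaces A's single interleaved append loop by an index table of retained positions and
-- five independent indexed passes (objective: alternative decomposition, same cost).

-- ===== PORT A =====
-- one loop over enumerate(images); on a retained image, append to all five accumulators
def exclude_images (images : List String) (pcds : List String) (labels : List Int) (masks : List String) (types : List String) (target_excluded_images : List String) : List String × List String × List Int × List String × List String :=
  (PySem.List.enumerate images 0).foldl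
    (fun acc p =>
      if target_excluded_images.contains p.2 then acc
      else (acc.1 ++ [p.2],
            acc.2.1 ++ [PySem.List.pyGetD pcds p.1 ""],
            acc.2.2.1 ++ [PySem.List.pyGetD labels p.1 0],
            acc.2.2.2.1 ++ [PySem.List.pyGetD masks p.1 ""],
            acc.2.2.2.2 ++ [PySem.List.pyGetD types p.1 ""]))
    ([], [], [], [], [])

-- ===== PORT B =====
-- build the excluded set, then the table of retained indices, then five indexed comprehensions
def exclude_images_alt (images : List String) (pcds : List String) (labels : List Int) (masks : List String) (types : List String) (target_excluded_images : List String) : List String × List String × List Int × List String × List String :=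
  let excluded := PySem.Set.ofList target_excluded_images
  let keep := ((PySem.List.enumerate images 0).filter (fun p => !(PySem.Set.contains excluded p.2))).map (·.1)
  (keep.map (fun i => PySem.List.pyGetD images i ""),
   keep.map (fun i => PySem.List.pyGetD pcds i ""),
   keep.map (fun i => PySem.List.pyGetD labels i 0),
   keep.map (fun i => PySem.List.pyGetD masks i ""),
   keep.map (fun i => PySem.List.pyGetD types i ""))

-- ===== PRECONDITION & SPEC =====
-- Pre_ excludes exactly the inputs on which Python A raises IndexError: a retained image whose
-- position is out of range for pcds, labels, masks or types.
def Pre_exclude_images (images : List String) (pcds : List String) (labels : List Int) (masks : List String) (types : List String) (target_excluded_images : List String) : Prop :=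
  ∀ k, (h : k < images.length) → images[k] ∉ target_excluded_images →
    k < pcds.length ∧ k < labels.length ∧ k < masks.length ∧ k < types.length
instance (images : List String) (pcds : List String) (labels : List Int) (masks : List String) (types : List String) (target_excluded_images : List String) : Decidable (Pre_exclude_images images pcds labels masks types target_excluded_images) := by unfold Pre_exclude_images; infer_instance

def pvWitness_exclude_images : List String × List String × List Int × List String × List String × List String :=
  (["a", "b", "c"], ["p0", "p1", "p2"], [1, 2, 3], ["m0", "m1", "m2"], ["t0", "t1", "t2"], ["b"])

def Spec_exclude_images (images : List String) (pcds : List String) (labels : List Int) (masks : List String) (types : List String) (target_excluded_images : List String) (out : List String × List String × List Int × List String × List String) : Prop := out = exclude_images_alt images pcds labels masks types target_excluded_images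
instance (images : List String) (pcds : List String) (labels : List Int) (masks : List String) (types : List String) (target_excluded_images : List String) (out : List String × List String × List Int × List String × List String) : Decidable (Spec_exclude_images images pcds labels masks types target_excluded_images out) := by unfold Spec_exclude_images; infer_instance

-- ===== CLAIM (what is proved, stated in full; the proofs are below) =====
def Claim_equal_exclude_images : Prop := ∀ (images : List String) (pcds : List String) (labels : List Int) (masks : List String) (types : List String) (target_excluded_images : List String), Dom_exclude_images images pcds labels masks types target_excluded_images → Pre_exclude_images images pcds labels masks types target_excluded_images → Spec_exclude_images images pcds labels masks types target_excluded_images (exclude_images images pcds labels masks types target_excluded_images)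

-- ===== LEMMAS AND PROOFS =====

-- A's interleaved five-accumulator fold, resolved into filter+map per component.
theorem exclude_images_fold (pcds : List String) (labels : List Int) (masks : List String) (types : List String) (tgt : List String) (l : List (Int × String)) (a b : List String) (c : List Int) (d e : List String) :
    l.foldl
      (fun acc p =>
        if tgt.contains p.2 then acc
        else (acc.1 ++ [p.2],
              acc.2.1 ++ [PySem.List.pyGetD pcds p.1 ""],
              acc.2.2.1 ++ [PySem.List.pyGetD labels p.1 0],
              acc.2.2.2.1 ++ [PySem.List.pyGetD masks p.1 ""],
              acc.2.2.2.2 ++ [PySem.List.pyGetD types p.1 ""]))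
      (a, b, c, d, e)
    = (a ++ (l.filter (fun p => !tgt.contains p.2)).map (·.2),
       b ++ (l.filter (fun p => !tgt.contains p.2)).map (fun p => PySem.List.pyGetD pcds p.1 ""),
       c ++ (l.filter (fun p => !tgt.contains p.2)).map (fun p => PySem.List.pyGetD labels p.1 0),
       d ++ (l.filter (fun p => !tgt.contains p.2)).map (fun p => PySem.List.pyGetD masks p.1 ""),
       e ++ (l.filter (fun p => !tgt.contains p.2)).map (fun p => PySem.List.pyGetD types p.1 "")) := by
  induction l generalizing a b c d e with
  | nil => simp
  | cons x xs ih =>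
    cases hx : tgt.contains x.2 with
    | true =>
      simp only [List.foldl_cons, List.filter_cons, hx, Bool.not_true, if_true, if_false,
        Bool.false_eq_true]
      exact ih a b c d e
    | false =>
      simp only [List.foldl_cons, List.filter_cons, hx, Bool.not_false, if_true, if_false,
        Bool.false_eq_true, List.map_cons]
      rw [ih]
      simp only [List.append_assoc, List.cons_append, List.nil_append]

-- ===== VERDICT =====
theorem exclude_images_spec : Claim_equal_exclude_images := by
  intro images pcds labels masks types tgt _ hpre
  unfold Spec_exclude_images exclude_images exclude_images_alt
  rw [exclude_images_fold]
  simp only [List.nil_append, List.map_map]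
  -- the two filter predicates agree (set membership vs list membership)
  have hfilt : (PySem.List.enumerate images 0).filter
      (fun p => !(PySem.Set.contains (PySem.Set.ofList tgt) p.2))
      = (PySem.List.enumerate images 0).filter (fun p => !tgt.contains p.2) := by
    apply List.filter_congr
    intro p _
    have : PySem.Set.contains (PySem.Set.ofList tgt) p.2 = tgt.contains p.2 := by
      by_cases h : p.2 ∈ tgt
      · simp [PySem.Set.mem_ofList, h]
      · simp [PySem.Set.mem_ofList, h]
    rw [this]
  rw [hfilt]
  refine Prod.ext ?_ (Prod.ext rfl (Prod.ext rfl (Prod.ext rfl rfl)))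
  -- first component: indexing images through the kept index equals the kept image itself
  simp only []
  apply List.map_congr_left
  intro p hp
  have hp' := List.mem_of_mem_filter hp
  rw [PySem.List.mem_enumerate_iff] at hp'
  obtain ⟨k, hk, rfl⟩ := hp'
  simp [PySem.List.pyGetD_natCast, List.getD_eq_getElem?_getD, hk]
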